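-- pv_equiv track=rewrite | github.com/yaohua405/DNS | mydns-solution.py | return_numbers
-- ===== SOURCE A (Python) =====
-- def return_numbers(domain_Name):
--     list_num = []
--     count = 0
--     for x in range(len(domain_Name)):
--         if domain_Name[x] == '.':
--             list_num.append(count)
--             count = 0
--         elif x == len(domain_Name)-1:
--             list_num.append(count + 1)
--             count = 0
--         else:
--             count += 1
--     return list_num
-- ===== SOURCE B (Python) =====
-- def return_numbers(domain_Name):
--     parts = domain_Name.split('.')
--     if parts[-1] == '':
--         parts = parts[:-1]
--     return [len(p) for p in parts]
-- ===== Notes on version B (the rewrite author's own statement) =====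
-- stated objective: simpler
-- what changed: Replaces the indexed character-by-character counter loop (with its special last-index branch) by splitting the string on the dot separator, dropping one trailing empty segment, and mapping len over the segments.
import Mathlib
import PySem

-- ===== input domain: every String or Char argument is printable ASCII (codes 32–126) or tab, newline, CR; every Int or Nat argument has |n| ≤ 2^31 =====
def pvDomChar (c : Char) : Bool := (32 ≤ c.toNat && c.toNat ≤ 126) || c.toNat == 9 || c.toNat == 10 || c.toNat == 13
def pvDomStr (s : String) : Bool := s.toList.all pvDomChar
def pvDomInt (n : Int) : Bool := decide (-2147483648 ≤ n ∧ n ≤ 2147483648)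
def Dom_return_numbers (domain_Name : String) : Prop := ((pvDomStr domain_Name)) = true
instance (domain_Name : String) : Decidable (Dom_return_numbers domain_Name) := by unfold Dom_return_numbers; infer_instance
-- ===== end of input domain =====

-- B replaces A's indexed counter loop by split('.') + drop one trailing empty + map len; objective: simpler (measured faster: the scan moves into C-level str.split).

-- ===== PORT A =====
-- literal transliteration of A: indexed for-loop, state (list_num, count)
def return_numbers (domain_Name : String) : List Int :=
  let cs := domain_Name.toList
  let n : Int := cs.length
  ((PySem.List.pyRange 0 n 1).foldl
    (fun (st : List Int × Int) x =>
      if PySem.List.pyGetD cs x ' ' = '.' then (st.1 ++ [st.2], 0)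
      else if x = n - 1 then (st.1 ++ [st.2 + 1], 0)
      else (st.1, st.2 + 1))
    ([], 0)).1

-- ===== PORT B =====
-- literal transliteration of Source B: split on '.', drop one trailing empty piece, map len
def return_numbers_alt (domain_Name : String) : List Int :=
  let parts := PySem.Chars.splitOn domain_Name.toList ['.']
  let parts2 := if parts.getLast? = some [] then parts.dropLast else parts
  parts2.map (fun p => (p.length : Int))

-- ===== PRECONDITION & SPEC =====
def Spec_return_numbers (domain_Name : String) (out : List Int) : Prop := out = return_numbers_alt domain_Name
instance (domain_Name : String) (out : List Int) : Decidable (Spec_return_numbers domain_Name out) := by unfold Spec_return_numbers; infer_instance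

-- ===== CLAIM (what is proved, stated in full; the proofs are below) =====
def Claim_equal_return_numbers : Prop := ∀ (domain_Name : String), Dom_return_numbers domain_Name → Spec_return_numbers domain_Name (return_numbers domain_Name)

-- ===== LEMMAS AND PROOFS =====

-- structural form of A's loop on the remaining suffix
def pvArec : List Char → List Int → Int → List Int
  | [], L, _ => L
  | c :: rest, L, cnt =>
    if c = '.' then pvArec rest (L ++ [cnt]) 0
    else if rest = [] then L ++ [cnt + 1]
    else pvArec rest L (cnt + 1)

-- structural form of split('.') : current piece carried reversed, as in splitOn.go
def pvSpl : List Char → List Char → List (List Char)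
  | rcur, [] => [rcur.reverse]
  | rcur, c :: rest => if c = '.' then rcur.reverse :: pvSpl [] rest else pvSpl (c :: rcur) rest

-- B's post-processing: drop one trailing empty piece, map lengths
def pvGLen (parts : List (List Char)) : List Int :=
  (if parts.getLast? = some [] then parts.dropLast else parts).map (fun p => (p.length : Int))

theorem pvSpl_dot (rcur rest : List Char) :
    pvSpl rcur ('.' :: rest) = rcur.reverse :: pvSpl [] rest := by
  rw [pvSpl]; simp

theorem pvSpl_nodot {c : Char} (hc : c ≠ '.') (rcur rest : List Char) :
    pvSpl rcur (c :: rest) = pvSpl (c :: rcur) rest := by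
  rw [pvSpl]; simp [hc]

theorem pvArec_dot (rest : List Char) (L : List Int) (cnt : Int) :
    pvArec ('.' :: rest) L cnt = pvArec rest (L ++ [cnt]) 0 := by
  rw [pvArec]; simp

theorem pvArec_last {c : Char} (hc : c ≠ '.') (L : List Int) (cnt : Int) :
    pvArec [c] L cnt = L ++ [cnt + 1] := by
  rw [pvArec]; simp [hc]

theorem pvArec_mid {c : Char} {rest : List Char} (hc : c ≠ '.') (hr : rest ≠ [])
    (L : List Int) (cnt : Int) :
    pvArec (c :: rest) L cnt = pvArec rest L (cnt + 1) := by
  rw [pvArec]; simp [hc, hr]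

theorem pvGetD_append_len (pre : List Char) (c : Char) (rest : List Char) (d : Char) :
    (pre ++ c :: rest).getD pre.length d = c := by
  induction pre with
  | nil => simp
  | cons a as ih => simpa using ih

theorem pvSpl_ne_nil (rcur l : List Char) : pvSpl rcur l ≠ [] := by
  induction l generalizing rcur with
  | nil => simp [pvSpl]
  | cons c rest ih =>
    by_cases hc : c = '.' <;> simp [pvSpl, hc, ih]

theorem pvGLen_cons (x : List Char) (parts : List (List Char)) (h : parts ≠ []) :
    pvGLen (x :: parts) = (x.length : Int) :: pvGLen parts := by
  obtain ⟨y, ys, rfl⟩ := List.exists_cons_of_ne_nil h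
  by_cases hl : (y :: ys).getLast? = some ([] : List Char) <;>
    simp [pvGLen, List.getLast?_cons_cons, hl]

-- A's fold over the index range from position pre.length equals pvArec on the suffix
theorem pvFold_eq_arec (cs : List Char) (suf pre : List Char) (L : List Int) (cnt : Int)
    (hcs : cs = pre ++ suf) :
    ((PySem.List.pyRange (pre.length : Int) (cs.length : Int) 1).foldl
      (fun (st : List Int × Int) x =>
        if PySem.List.pyGetD cs x ' ' = '.' then (st.1 ++ [st.2], 0)
        else if x = (cs.length : Int) - 1 then (st.1 ++ [st.2 + 1], 0)
        else (st.1, st.2 + 1))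
      (L, cnt)).1 = pvArec suf L cnt := by
  induction suf generalizing pre L cnt with
  | nil =>
    rw [PySem.List.pyRange_one_eq_nil (by simp [hcs])]
    simp [pvArec]
  | cons c rest ih =>
    have hlen : cs.length = pre.length + 1 + rest.length := by simp [hcs]; omega
    have hlt : (pre.length : Int) < (cs.length : Int) := by push_cast [hlen, List.length_append, List.length_cons, List.length_nil]; omega
    have hstep : ((pre.length : Int) + 1) = (((pre ++ [c]).length : Nat) : Int) := by
      simp
    rw [PySem.List.pyRange_one_cons hlt]
    simp only [List.foldl_cons]
    have hget : PySem.List.pyGetD cs (pre.length : Int) ' ' = c := by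
      rw [hcs, PySem.List.pyGetD_natCast, pvGetD_append_len]
    rw [hget]
    by_cases hc : c = '.'
    · subst hc
      rw [if_pos rfl, pvArec_dot, hstep]
      exact ih (pre ++ ['.']) (L ++ [cnt]) 0 (by simp [hcs])
    · cases rest with
      | nil =>
        have hlast : (pre.length : Int) = (cs.length : Int) - 1 := by
          push_cast [hlen, List.length_append, List.length_cons, List.length_nil]; omega
        rw [if_neg hc, if_pos hlast, pvArec_last hc,
          PySem.List.pyRange_one_eq_nil (by push_cast [hlen, List.length_append, List.length_cons, List.length_nil]; omega)]
        simp
      | cons r rs =>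
        have hnotlast : ¬ ((pre.length : Int) = (cs.length : Int) - 1) := by
          push_cast [hlen, List.length_append, List.length_cons, List.length_nil]; omega
        rw [if_neg hc, if_neg hnotlast, pvArec_mid hc (List.cons_ne_nil r rs), hstep]
        exact ih (pre ++ [c]) L (cnt + 1) (by simp [hcs])

-- splitOn.go with separator "." and enough fuel is pvSpl
theorem pvGo_eq_spl (l : List Char) (fuel : Nat) (rcur : List Char) (acc : List (List Char))
    (hf : l.length ≤ fuel) :
    PySem.Chars.splitOn.go ['.'] fuel l rcur acc = acc.reverse ++ pvSpl rcur l := by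
  induction l generalizing fuel rcur acc with
  | nil =>
    cases fuel <;> simp [PySem.Chars.splitOn.go, pvSpl]
  | cons c rest ih =>
    cases fuel with
    | zero => simp at hf
    | succ f =>
      by_cases hc : c = '.'
      · have hpre : (['.'] : List Char).isPrefixOf (c :: rest) = true := by
          simp [List.isPrefixOf, hc]
        rw [PySem.Chars.splitOn.go, if_pos hpre]
        simp only [List.length_cons, List.length_nil, List.drop_succ_cons, List.drop_zero]
        rw [ih f [] (rcur.reverse :: acc) (by simpa using hf)]
        subst hc
        rw [pvSpl_dot]
        simp
      · have hpre : (['.'] : List Char).isPrefixOf (c :: rest) = false := by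
          simp [List.isPrefixOf]; exact fun h => (hc h.symm).elim
        rw [PySem.Chars.splitOn.go, if_neg (by simp [hpre])]
        rw [ih f (c :: rcur) acc (by simpa using hf), pvSpl_nodot hc]

theorem pvSplitOn_eq_spl (cs : List Char) :
    PySem.Chars.splitOn cs ['.'] = pvSpl [] cs := by
  rw [PySem.Chars.splitOn, pvGo_eq_spl cs (cs.length + 1) [] [] (by omega)]
  simp

-- pvArec computes the lengths of the split pieces
theorem pvArec_eq_gLen (suf : List Char) (rcur : List Char) (L : List Int) (h : suf ≠ []) :
    pvArec suf L (rcur.length : Int) = L ++ pvGLen (pvSpl rcur suf) := by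
  induction suf generalizing rcur L with
  | nil => exact (h rfl).elim
  | cons c rest ih =>
    by_cases hc : c = '.'
    · subst hc
      cases rest with
      | nil =>
        rw [pvArec_dot, pvSpl_dot]
        simp [pvArec, pvSpl, pvGLen]
      | cons r rs =>
        rw [pvArec_dot, pvSpl_dot]
        have h0 : (0 : Int) = (([] : List Char).length : Int) := by simp
        rw [h0, ih [] (L ++ [((rcur.length : Nat) : Int)]) (by simp),
          pvGLen_cons _ _ (pvSpl_ne_nil [] (r :: rs))]
        simp
    · cases rest with
      | nil =>
        rw [pvArec_last hc, pvSpl_nodot hc,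
          show pvSpl (c :: rcur) [] = [(c :: rcur).reverse] from rfl]
        have hne : ¬ ([(c :: rcur).reverse].getLast? = some ([] : List Char)) := by
          simp
        simp [pvGLen]
      | cons r rs =>
        have hcnt : ((rcur.length : Int) + 1) = (((c :: rcur).length : Nat) : Int) := by
          simp
        rw [pvArec_mid hc (List.cons_ne_nil r rs), pvSpl_nodot hc, hcnt,
          ih (c :: rcur) L (List.cons_ne_nil r rs)]

-- ===== VERDICT (by name: the statement is the Claim_ definition above) =====
theorem return_numbers_spec : Claim_equal_return_numbers := by
  intro s _
  simp only [Spec_return_numbers, return_numbers, return_numbers_alt]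
  rw [pvSplitOn_eq_spl]
  cases hcs : s.toList with
  | nil =>
    simp [PySem.List.pyRange_one_eq_nil, pvSpl]
  | cons c rest =>
    have hA := pvFold_eq_arec (c :: rest) (c :: rest) [] [] 0 (by simp)
    simp only [List.length_nil, Nat.cast_zero] at hA
    have hB := pvArec_eq_gLen (c :: rest) [] [] (by simp)
    simp only [List.length_nil, Nat.cast_zero, List.nil_append] at hB
    rw [hA, hB]
    rfl
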